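-- pv_equiv track=rewrite | github.com/Megh200/python | 5.py | max_consecutive_days
-- ===== SOURCE A (Python) =====
-- def max_consecutive_days(e, w, data):
--     max_consecutive = 0
--     current_consecutive = 0
--
--     for day in range(w):
--         all_present = all(data[i][day] == 'P' for i in range(e))
--
--         if all_present:
--             current_consecutive += 1
--             max_consecutive = max(max_consecutive, current_consecutive)
--         else:
--             current_consecutive = 0
--
--     return max_consecutive
-- ===== SOURCE B (Python) =====
-- def max_consecutive_days(e, w, data):
--     days = range(w)
--     absent = [d for d in days if not all(data[i][d] == 'P' for i in range(e))]
--     bounds = [-1] + absent + [len(days)]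
--     return max(hi - lo - 1 for lo, hi in zip(bounds, bounds[1:]))
-- ===== Notes on version B (the rewrite author's own statement) =====
-- stated objective: alternative
-- what changed: B drops A's running counter + running maximum: it collects the positions of the absent days and returns the largest gap between consecutive breaks (-1, absent days, number of days).
import Mathlib
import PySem

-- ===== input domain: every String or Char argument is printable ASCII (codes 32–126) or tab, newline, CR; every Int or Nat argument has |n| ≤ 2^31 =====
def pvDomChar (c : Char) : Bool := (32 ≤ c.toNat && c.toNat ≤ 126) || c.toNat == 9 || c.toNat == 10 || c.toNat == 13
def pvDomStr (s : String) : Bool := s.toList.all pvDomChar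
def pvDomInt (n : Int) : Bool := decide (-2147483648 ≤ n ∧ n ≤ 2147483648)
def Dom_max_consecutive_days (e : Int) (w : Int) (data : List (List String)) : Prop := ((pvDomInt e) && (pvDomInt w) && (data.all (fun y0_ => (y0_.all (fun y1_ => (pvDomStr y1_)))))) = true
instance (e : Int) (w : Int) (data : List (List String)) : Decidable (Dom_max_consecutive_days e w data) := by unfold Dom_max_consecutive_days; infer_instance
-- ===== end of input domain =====

-- B replaces A's running counter + running maximum by a positions/gaps decomposition:
-- it lists the absent days and returns the largest gap between consecutive breaks (objective: alternative).

-- ===== PORT A =====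
-- all(data[i][day] == 'P' for i in range(e))  (value-exact; pyGet? = none where Python raises, excluded by Pre_)
def pvAAll (e : Int) (day : Int) (data : List (List String)) : Bool :=
  (PySem.List.pyRange 0 e 1).all
    (fun i => ((PySem.List.pyGet? data i).bind (fun row => PySem.List.pyGet? row day)) == some "P")

def max_consecutive_days (e : Int) (w : Int) (data : List (List String)) : Int :=
  ((PySem.List.pyRange 0 w 1).foldl
      (fun (st : Int × Int) day =>
        if pvAAll e day data then
          (max st.1 (st.2 + 1), st.2 + 1)
        else
          (st.1, 0))
      (0, 0)).1

-- ===== PORT B =====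
-- all(data[i][d] == 'P' for i in range(e))  (same membership expression as in Source B)
def pvBAll (e : Int) (d : Int) (data : List (List String)) : Bool :=
  (PySem.List.pyRange 0 e 1).all
    (fun i => ((PySem.List.pyGet? data i).bind (fun row => PySem.List.pyGet? row d)) == some "P")

def max_consecutive_days_alt (e : Int) (w : Int) (data : List (List String)) : Int :=
  let days := PySem.List.pyRange 0 w 1
  let absent := days.filter (fun d => ! pvBAll e d data)
  let bounds := -1 :: (absent ++ [(days.length : Int)])
  -- bounds[1:] is bounds.tail (PySem.List.slice_from_one); max(gen) ported as a fold over the nonempty gaps list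
  let gaps := (bounds.zip bounds.tail).map (fun q => q.2 - q.1 - 1)
  match gaps with
  | [] => 0            -- unreachable: bounds always has ≥ 2 elements
  | x :: t => t.foldl max x

-- ===== PRECONDITION & SPEC =====
-- Pre_ is exactly the inputs on which Python A returns: every index data[i][day] that the
-- short-circuiting all(...) actually evaluates is in range (otherwise A raises IndexError).
-- (quantifiers are bounded by the data shape so the condition is cheaply decidable: a day
-- d ≥ len(data[0]) already fails for i = 0, and an i > len(data) has a false hypothesis)
def Pre_max_consecutive_days (e : Int) (w : Int) (data : List (List String)) : Prop :=
  ∀ d < min w.toNat ((data.getD 0 []).length + 1), ∀ i < min e.toNat (data.length + 1),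
    (∀ j < i, j < data.length ∧ d < (data.getD j []).length ∧ (data.getD j []).getD d "" = "P") →
    i < data.length ∧ d < (data.getD i []).length
instance (e : Int) (w : Int) (data : List (List String)) : Decidable (Pre_max_consecutive_days e w data) := by unfold Pre_max_consecutive_days; infer_instance

def pvWitness_max_consecutive_days : Int × Int × List (List String) := (1, 2, [["P", "A"]])

def Spec_max_consecutive_days (e : Int) (w : Int) (data : List (List String)) (out : Int) : Prop := out = max_consecutive_days_alt e w data
instance (e : Int) (w : Int) (data : List (List String)) (out : Int) : Decidable (Spec_max_consecutive_days e w data out) := by unfold Spec_max_consecutive_days; infer_instance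

-- ===== CLAIM (what is proved, stated in full; the proofs are below) =====
def Claim_equal_max_consecutive_days : Prop := ∀ (e : Int) (w : Int) (data : List (List String)), Dom_max_consecutive_days e w data → Pre_max_consecutive_days e w data → Spec_max_consecutive_days e w data (max_consecutive_days e w data)

-- ===== LEMMAS AND PROOFS =====

-- A's loop body over an abstract per-day predicate
def pvStep (p : Int → Bool) : Int × Int → Int → Int × Int :=
  fun st day => if p day then (max st.1 (st.2 + 1), st.2 + 1) else (st.1, 0)

-- B's gap list of a bounds list
def pvGaps (l : List Int) : List Int := (l.zip l.tail).map (fun q => q.2 - q.1 - 1)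

-- A's loop state after n days
def pvA (p : Int → Bool) (n : Nat) : Int × Int :=
  ((List.range n).map (fun k => (k : Int))).foldl (pvStep p) (0, 0)

-- B's gap list after n days
def pvB (p : Int → Bool) (n : Nat) : List Int :=
  pvGaps (-1 :: (((List.range n).map (fun k => (k : Int))).filter (fun d => ! p d) ++ [(n : Int)]))

lemma pv_foldl_max_max (t : List Int) (a b : Int) :
    t.foldl max (max a b) = max a (t.foldl max b) := by
  induction t generalizing b with
  | nil => simp
  | cons c t ih =>
      simp only [List.foldl_cons]
      rw [max_assoc, ih]

lemma pv_gaps_snoc (l : List Int) (h : l ≠ []) (a : Int) :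
    pvGaps (l ++ [a]) = pvGaps l ++ [a - l.getLast h - 1] := by
  induction l with
  | nil => exact absurd rfl h
  | cons x l ih =>
      cases l with
      | nil => simp [pvGaps]
      | cons y t =>
          simp only [pvGaps, List.cons_append, List.tail_cons, List.zip_cons_cons,
            List.map_cons] at *
          rw [ih (by simp)]
          simp [List.getLast]

lemma pv_snoc_inj {l1 l2 : List Int} {a b : Int} (h : l1 ++ [a] = l2 ++ [b]) :
    l1 = l2 ∧ a = b := by
  have := List.append_inj' h rfl
  simpa using this

-- loop invariant: B's gap list ends in A's running counter, and A's running maximum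
-- is the maximum of the gap list
lemma pv_inv (p : Int → Bool) (n : Nat) :
    ∃ g : List Int,
      pvB p n = g ++ [(pvA p n).2] ∧
      (pvA p n).1 = g.foldl max (pvA p n).2 ∧
      0 ≤ (pvA p n).2 := by
  induction n with
  | zero =>
      refine ⟨[], ?_, ?_, ?_⟩ <;> simp [pvA, pvB, pvGaps]
  | succ n ih =>
      obtain ⟨g, hB, hM, hc⟩ := ih
      have hrange : (List.range (n + 1)).map (fun k => (k : Int))
          = (List.range n).map (fun k => (k : Int)) ++ [(n : Int)] := by
        rw [List.range_succ]; simp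
      have hA1 : pvA p (n + 1) = pvStep p (pvA p n) (n : Int) := by
        unfold pvA; rw [hrange, List.foldl_append]; simp
      have hcast : ((n + 1 : Nat) : Int) = (n : Int) + 1 := by push_cast; ring
      by_cases hp : p (n : Int) = true
      · -- day n present: last gap grows by one
        have hfil : ((List.range (n+1)).map (fun k => (k : Int))).filter (fun d => ! p d)
            = ((List.range n).map (fun k => (k : Int))).filter (fun d => ! p d) := by
          rw [hrange, List.filter_append]; simp [hp]
        set F := ((List.range n).map (fun k => (k : Int))).filter (fun d => ! p d) with hF
        have hBn : pvB p n = pvGaps ((-1 :: F) ++ [(n : Int)]) := by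
          unfold pvB; rw [← hF]; rfl
        have hgs := pv_gaps_snoc (-1 :: F) (by simp) (n : Int)
        have hsplit : pvGaps (-1 :: F) = g ∧
            (n : Int) - (-1 :: F).getLast (by simp) - 1 = (pvA p n).2 := by
          apply pv_snoc_inj; rw [← hgs, ← hBn, hB]
        have hB1 : pvB p (n+1) = g ++ [(pvA p n).2 + 1] := by
          unfold pvB
          rw [hfil, hcast]
          have : (-1 : Int) :: (F ++ [(n : Int) + 1]) = (-1 :: F) ++ [(n : Int) + 1] := rfl
          rw [this, pv_gaps_snoc (-1 :: F) (by simp) ((n : Int) + 1), hsplit.1]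
          have := hsplit.2
          congr 1
          simp
          omega
        refine ⟨g, ?_, ?_, ?_⟩
        · rw [hA1, pvStep, hp]; simpa using hB1
        · rw [hA1, pvStep, hp]
          simp only [if_true]
          have h1 : g.foldl max ((pvA p n).2 + 1)
              = max ((pvA p n).2 + 1) (g.foldl max (pvA p n).2) := by
            rw [← pv_foldl_max_max]
            congr 1
            omega
          rw [h1, ← hM]
          simp [max_comm]
        · rw [hA1, pvStep, hp]; simp; omega
      · -- day n absent: a new break, last gap becomes 0
        have hp' : p (n : Int) = false := by simpa using hp
        have hfil : ((List.range (n+1)).map (fun k => (k : Int))).filter (fun d => ! p d)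
            = (((List.range n).map (fun k => (k : Int))).filter (fun d => ! p d)) ++ [(n : Int)] := by
          rw [hrange, List.filter_append]; simp [hp']
        set F := ((List.range n).map (fun k => (k : Int))).filter (fun d => ! p d) with hF
        have hBn : pvB p n = pvGaps ((-1 :: F) ++ [(n : Int)]) := by
          unfold pvB; rw [← hF]; rfl
        have hB1 : pvB p (n+1) = (g ++ [(pvA p n).2]) ++ [0] := by
          unfold pvB
          rw [hfil, hcast]
          have h2 : (-1 : Int) :: (F ++ [(n : Int)] ++ [(n : Int) + 1])
              = ((-1 :: F) ++ [(n : Int)]) ++ [(n : Int) + 1] := by simp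
          rw [h2, pv_gaps_snoc _ (by simp) _, ← hBn, hB]
          congr 1
          simp
        refine ⟨g ++ [(pvA p n).2], ?_, ?_, ?_⟩
        · rw [hA1, pvStep, hp']; simpa using hB1
        · rw [hA1, pvStep, hp']
          simp only [Bool.false_eq_true, if_false]
          rw [List.foldl_append]
          simp only [List.foldl_cons, List.foldl_nil]
          rw [hM]
          have : (pvA p n).2 = max (pvA p n).2 0 := by omega
          rw [this, pv_foldl_max_max]
          omega
        · rw [hA1, pvStep, hp']; simp

lemma pv_pyRange_nat (n : Nat) :
    PySem.List.pyRange 0 (n : Int) 1 = (List.range n).map (fun k => (k : Int)) := by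
  rw [PySem.List.pyRange_zero_natCast]
  induction n with
  | zero => simp
  | succ m ih => rw [List.range_succ]; simp_all

lemma pv_pyRange_toNat (w : Int) :
    PySem.List.pyRange 0 w 1 = (List.range w.toNat).map (fun k => (k : Int)) := by
  by_cases h : 0 ≤ w
  · rw [← Int.toNat_of_nonneg h]
    exact pv_pyRange_nat w.toNat
  · rw [show w.toNat = 0 by omega]
    simp [PySem.List.pyRange]
    omega

lemma pv_match_snoc (g : List Int) (x : Int) :
    (match g ++ [x] with | [] => (0 : Int) | a :: t => t.foldl max a) = g.foldl max x := by
  cases g with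
  | nil => simp
  | cons a t =>
      simp only [List.cons_append, List.foldl_cons, List.foldl_append, List.foldl_nil]
      rw [max_comm (List.foldl max a t) x, ← pv_foldl_max_max]

-- the two ports agree on every input (Pre_ is only needed for the Python A to return at all)
lemma pv_ports_eq (e w : Int) (data : List (List String)) :
    max_consecutive_days e w data = max_consecutive_days_alt e w data := by
  unfold max_consecutive_days max_consecutive_days_alt
  dsimp only
  rw [pv_pyRange_toNat]
  rw [show (((List.range w.toNat).map (fun k => (k : Int))).length) = w.toNat from by simp]
  obtain ⟨g, hB, hM, hc⟩ := pv_inv (fun d => pvAAll e d data) w.toNat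
  have hL : ((List.range w.toNat).map (fun k => (k : Int))).foldl
      (fun (st : Int × Int) day => if pvAAll e day data then (max st.1 (st.2 + 1), st.2 + 1) else (st.1, 0)) (0, 0)
      = pvA (fun d => pvAAll e d data) w.toNat := rfl
  have hG : ((-1 :: (((List.range w.toNat).map (fun k => (k : Int))).filter (fun d => ! pvBAll e d data) ++ [(w.toNat : Int)])).zip
      (((-1 :: (((List.range w.toNat).map (fun k => (k : Int))).filter (fun d => ! pvBAll e d data) ++ [(w.toNat : Int)])).tail))).map (fun q => q.2 - q.1 - 1)
      = pvB (fun d => pvAAll e d data) w.toNat := rfl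
  rw [hL, hG, hB, pv_match_snoc, hM]

-- ===== VERDICT (by name: the statement is the Claim_ definition above) =====
theorem max_consecutive_days_spec : Claim_equal_max_consecutive_days := by
  intro e w data _ _
  unfold Spec_max_consecutive_days
  exact pv_ports_eq e w data
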